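-- pv_equiv track=rewrite | github.com/twisteddi84/Fundamentos-Programacao | Estudos/prog.py | longestPrefixRepeated
-- ===== SOURCE A (Python) =====
-- def longestPrefixRepeated(s):
--     count = 1
--     n = s[0:count]
--     m = s
--     for i in s:
--         m = m[1:]
--         n = s[0:count]
--         if n in m:
--             count += 1
--         else:
--             count -= 1
--             n = s[0:count]
--             break
--     return n
-- ===== SOURCE B (Python) =====
-- def longestPrefixRepeated(s):
--     # The predicate "s[:k] occurs in s[k:]" is monotone (decreasing) in k,
--     # so binary-search the largest k satisfying it instead of scanning.
--     lo, hi = 0, len(s)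
--     while lo < hi:
--         mid = (lo + hi + 1) // 2
--         if s[:mid] in s[mid:]:
--             lo = mid
--         else:
--             hi = mid - 1
--     return s[:lo]
-- ===== Notes on version B (the rewrite author's own statement) =====
-- stated objective: faster
-- what changed: Replaces A's linear scan that grows the prefix by one character and re-searches it in the shrinking suffix until a search fails by a binary search on the monotone predicate that the length-k prefix occurs in the suffix following it, needing O(log n) containment tests instead of O(n).
import Mathlib
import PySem

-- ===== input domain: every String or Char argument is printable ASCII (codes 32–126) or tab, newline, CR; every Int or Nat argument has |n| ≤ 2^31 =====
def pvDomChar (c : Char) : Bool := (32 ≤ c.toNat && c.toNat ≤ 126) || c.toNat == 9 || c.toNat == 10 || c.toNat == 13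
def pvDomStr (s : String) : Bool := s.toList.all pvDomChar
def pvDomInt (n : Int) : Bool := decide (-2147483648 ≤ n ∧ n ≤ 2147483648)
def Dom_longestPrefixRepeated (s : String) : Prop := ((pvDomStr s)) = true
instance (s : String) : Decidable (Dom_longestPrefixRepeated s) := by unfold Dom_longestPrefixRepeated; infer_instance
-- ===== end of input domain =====

-- B replaces A's linear scan (grow the prefix by one and re-search it in the shrinking
-- suffix until a search fails) by a binary search on the monotone predicate that the
-- length-k prefix occurs in the suffix following it; objective: faster
-- (O(log n) containment tests instead of O(n)).

-- ===== PORT A =====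
-- A's for-loop (with its break) as structural recursion over the iterated characters;
-- the state (count, n, m) is exactly the Python's, on s.toList.
def pvLoopA (sl : List Char) : List Char → Int → List Char → List Char → List Char
  | [], _, n, _ => n
  | _ :: rest, count, _, m =>
    let m' := PySem.List.slice m (some 1) none
    let n' := PySem.List.slice sl (some 0) (some count)
    if PySem.Chars.isIn n' m' then pvLoopA sl rest (count + 1) n' m'
    else PySem.List.slice sl (some 0) (some (count - 1))

def longestPrefixRepeated (s : String) : String :=
  String.ofList
    (pvLoopA s.toList s.toList 1 (PySem.List.slice s.toList (some 0) (some 1)) s.toList)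

-- ===== PORT B =====
def pvBSearch (sl : List Char) (lo hi : Int) : Int :=
  if h : lo < hi then
    if PySem.Chars.isIn (PySem.List.slice sl none (some (PySem.Int.floordiv (lo + hi + 1) 2)))
        (PySem.List.slice sl (some (PySem.Int.floordiv (lo + hi + 1) 2)) none) then
      pvBSearch sl (PySem.Int.floordiv (lo + hi + 1) 2) hi
    else
      pvBSearch sl lo (PySem.Int.floordiv (lo + hi + 1) 2 - 1)
  else lo
termination_by (hi - lo).toNat
decreasing_by
  all_goals rw [PySem.Int.floordiv_eq_ediv_of_pos (by omega)]; omega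

def longestPrefixRepeated_alt (s : String) : String :=
  String.ofList (PySem.List.slice s.toList none
    (some (pvBSearch s.toList 0 (s.toList.length : Int))))

-- ===== PRECONDITION & SPEC =====
def Spec_longestPrefixRepeated (s : String) (out : String) : Prop := out = longestPrefixRepeated_alt s
instance (s : String) (out : String) : Decidable (Spec_longestPrefixRepeated s out) := by unfold Spec_longestPrefixRepeated; infer_instance

-- ===== CLAIM (what is proved, stated in full; the proofs are below) =====
def Claim_equal_longestPrefixRepeated : Prop := ∀ (s : String), Dom_longestPrefixRepeated s → Spec_longestPrefixRepeated s (longestPrefixRepeated s)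

-- ===== LEMMAS AND PROOFS =====

-- the predicate binary-searched by B, exactly as the port states it (proof-side notion)
def pvOk (sl : List Char) (k : Int) : Prop :=
  PySem.Chars.isIn (PySem.List.slice sl none (some k)) (PySem.List.slice sl (some k) none) = true

-- for 0 ≤ k it says: the prefix of length k is an infix of the suffix from k
theorem pvOk_iff (sl : List Char) (k : Int) (h0 : 0 ≤ k) :
    pvOk sl k ↔ (sl.take k.toNat <:+: sl.drop k.toNat) := by
  unfold pvOk
  rw [PySem.List.slice_to sl h0, PySem.List.slice_from sl h0]
  exact PySem.Chars.isIn_iff_infix _ _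

-- the predicate is monotone: if a longer prefix still occurs further right, so does a shorter one
theorem pvOk_mono (sl : List Char) (j k : Int) (h0 : 0 ≤ j) (hjk : j ≤ k) (hk : pvOk sl k) :
    pvOk sl j := by
  rw [pvOk_iff sl k (by omega)] at hk
  rw [pvOk_iff sl j h0]
  have htake : sl.take j.toNat <+: sl.take k.toNat := by
    rw [show sl.take j.toNat = (sl.take k.toNat).take j.toNat by
      rw [List.take_take]; congr 1; omega]
    exact List.take_prefix _ _
  have hdrop : sl.drop k.toNat <:+ sl.drop j.toNat := by
    rw [show sl.drop k.toNat = (sl.drop j.toNat).drop (k.toNat - j.toNat) by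
      rw [List.drop_drop]; congr 1; omega]
    exact List.drop_suffix _ _
  exact (htake.isInfix.trans hk).trans hdrop.isInfix

-- the binary search returns the largest k ≤ hi satisfying the predicate
theorem pvBSearch_eq (sl : List Char) (lo hi : Int)
    (h0 : 0 ≤ lo) (hn : hi ≤ sl.length) (hlh : lo ≤ hi) (hlo : pvOk sl lo)
    (hhi : ∀ k : Int, hi < k → k ≤ sl.length → ¬ pvOk sl k) :
    0 ≤ pvBSearch sl lo hi ∧ pvBSearch sl lo hi ≤ hi ∧ pvOk sl (pvBSearch sl lo hi) ∧
      ∀ k : Int, pvBSearch sl lo hi < k → k ≤ sl.length → ¬ pvOk sl k := by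
  rw [pvBSearch]
  by_cases h : lo < hi
  · rw [dif_pos h]
    have hmid : lo < PySem.Int.floordiv (lo + hi + 1) 2 ∧
        PySem.Int.floordiv (lo + hi + 1) 2 ≤ hi := by
      rw [PySem.Int.floordiv_eq_ediv_of_pos (by omega)]; omega
    by_cases hc : pvOk sl (PySem.Int.floordiv (lo + hi + 1) 2)
    · rw [if_pos (by unfold pvOk at hc; exact hc)]
      have := pvBSearch_eq sl (PySem.Int.floordiv (lo + hi + 1) 2) hi
        (by omega) hn (by omega) hc hhi
      exact ⟨by omega, this.2.1, this.2.2⟩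
    · rw [if_neg (by unfold pvOk at hc; exact hc)]
      have hhi' : ∀ k : Int, PySem.Int.floordiv (lo + hi + 1) 2 - 1 < k →
          k ≤ sl.length → ¬ pvOk sl k := by
        intro k hk1 hk2 hok
        exact hc (pvOk_mono sl _ k (by omega) (by omega) hok)
      have := pvBSearch_eq sl lo (PySem.Int.floordiv (lo + hi + 1) 2 - 1)
        h0 (by omega) (by omega) hlo hhi'
      exact ⟨this.1, by omega, this.2.2⟩
  · rw [dif_neg h]
    exact ⟨h0, by omega, hlo, fun k hk1 hk2 => hhi k (by omega) hk2⟩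
termination_by (hi - lo).toNat
decreasing_by
  all_goals rw [PySem.Int.floordiv_eq_ediv_of_pos (by omega)] at *; omega

-- B's value L: 0 ≤ L, and k ≤ L characterises "prefix of length k occurs in the suffix"
theorem pvB_spec (sl : List Char) :
    0 ≤ pvBSearch sl 0 (sl.length : Int) ∧
      ∀ k : Nat, 1 ≤ k → k ≤ sl.length →
        ((sl.take k <:+: sl.drop k) ↔ (k : Int) ≤ pvBSearch sl 0 (sl.length : Int)) := by
  have h := pvBSearch_eq sl 0 (sl.length : Int) le_rfl le_rfl (by positivity)
    (by rw [pvOk_iff sl 0 le_rfl]; simp)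
    (by intro k hk1 hk2; omega)
  obtain ⟨hB0, hBhi, hBok, hBmax⟩ := h
  refine ⟨hB0, fun k hk1 hk2 => ?_⟩
  have hkk : ((k : Int)).toNat = k := by omega
  constructor
  · intro hck
    by_contra hgt
    push Not at hgt
    exact hBmax (k : Int) (by omega) (by exact_mod_cast hk2)
      (by rw [pvOk_iff sl _ (by positivity), hkk]; exact hck)
  · intro hle
    have := pvOk_mono sl (k : Int) (pvBSearch sl 0 (sl.length : Int)) (by positivity) hle hBok
    rw [pvOk_iff sl _ (by positivity), hkk] at this
    exact this

-- A's loop, resumed at iteration i under the loop invariant, returns take L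
theorem pvLoopA_eq (sl : List Char) (L : Int) (hL0 : 0 ≤ L)
    (HA : ∀ k : Nat, 1 ≤ k → k ≤ sl.length → ((sl.take k <:+: sl.drop k) ↔ (k : Int) ≤ L)) :
    ∀ (r i : Nat) (nprev : List Char), 1 ≤ i → i + r = sl.length + 1 →
      (∀ k : Nat, 1 ≤ k → k < i → sl.take k <:+: sl.drop k) →
      (sl = [] → nprev = []) →
      pvLoopA sl (sl.drop (i - 1)) (i : Int) nprev (sl.drop (i - 1)) = sl.take L.toNat := by
  intro r
  induction r with
  | zero =>
    intro i nprev h1 hsum hc hnp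
    rcases Nat.eq_zero_or_pos sl.length with hn | hn
    · -- sl = []
      have hsl : sl = [] := List.eq_nil_of_length_eq_zero hn
      subst hsl
      rw [hnp rfl]
      simp [pvLoopA]
    · -- contradiction: c(n) holds but drop n = []
      exfalso
      have hcn := hc sl.length (by omega) (by omega)
      rw [List.drop_length, List.infix_nil] at hcn
      have := congrArg List.length hcn
      rw [List.length_take, List.length_nil] at this
      omega
  | succ r ih =>
    intro i nprev h1 hsum hc hnp
    have hin : i ≤ sl.length := by omega
    -- the remaining character list is nonempty
    obtain ⟨c, cs, hcons⟩ : ∃ c cs, sl.drop (i - 1) = c :: cs := by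
      have : (sl.drop (i - 1)).length = sl.length - (i - 1) := List.length_drop
      cases hd : sl.drop (i - 1) with
      | nil => rw [hd] at this; simp at this; omega
      | cons c cs => exact ⟨c, cs, rfl⟩
    have hcs : cs = sl.drop i := by
      have := List.tail_drop (l := sl) (i := i - 1)
      rw [hcons] at this
      simpa [show i - 1 + 1 = i by omega] using this
    rw [hcons, pvLoopA]
    have hn' : PySem.List.slice sl (some 0) (some (i : Int)) = sl.take i := by
      rw [PySem.List.slice_zero_start, PySem.List.slice_to_natCast]
    have hm' : PySem.List.slice (c :: cs) (some 1) none = sl.drop i := by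
      rw [PySem.List.slice_from_one]; simpa using hcs
    rw [hn', hm']
    by_cases hci : sl.take i <:+: sl.drop i
    · rw [if_pos ((PySem.Chars.isIn_iff_infix _ _).2 hci)]
      have hcall := ih (i + 1) (sl.take i) (by omega) (by omega)
        (fun k hk1 hk2 => by
          rcases Nat.lt_or_ge k i with hlt | hge
          · exact hc k hk1 hlt
          · have : k = i := by omega
            subst this; exact hci)
        (fun hsl => by simp [hsl])
      rw [show ((i : Int) + 1) = ((i + 1 : Nat) : Int) by push_cast; ring]
      rw [show (i + 1) - 1 = i from rfl] at hcall
      rw [hcs]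
      exact hcall
    · rw [if_neg (fun hx => hci ((PySem.Chars.isIn_iff_infix _ _).1 hx))]
      -- L = i - 1
      have hub : L < (i : Int) := by
        by_contra hge
        push Not at hge
        exact hci ((HA i h1 hin).2 hge)
      have hLval : L = ((i - 1 : Nat) : Int) := by
        rcases Nat.lt_or_ge i 2 with hi2 | hi2
        · have : i = 1 := by omega
          subst this; simp; omega
        · have hlb := (HA (i - 1) (by omega) (by omega)).1 (hc (i - 1) (by omega) (by omega))
          omega
      rw [show ((i : Int) - 1) = ((i - 1 : Nat) : Int) by omega, PySem.List.slice_zero_start,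
        PySem.List.slice_to_natCast, hLval]
      simp

theorem pvFinal (s : String) : longestPrefixRepeated s = longestPrefixRepeated_alt s := by
  obtain ⟨hL0, HA⟩ := pvB_spec s.toList
  have hloop := pvLoopA_eq s.toList (pvBSearch s.toList 0 (s.toList.length : Int)) hL0 HA
    s.toList.length 1 (PySem.List.slice s.toList (some 0) (some 1)) (by omega) (by omega)
    (by intro k hk1 hk2; omega)
    (by intro h; rw [h]; rfl)
  simp only [Nat.sub_self, List.drop_zero, Nat.cast_one] at hloop
  show String.ofList (pvLoopA s.toList s.toList 1
      (PySem.List.slice s.toList (some 0) (some 1)) s.toList)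
    = String.ofList (PySem.List.slice s.toList none
        (some (pvBSearch s.toList 0 (s.toList.length : Int))))
  rw [hloop, PySem.List.slice_to s.toList hL0]

-- ===== VERDICT (by name: the statement is the Claim_ definition above) =====
theorem longestPrefixRepeated_spec : Claim_equal_longestPrefixRepeated := by
  intro s _
  show longestPrefixRepeated s = longestPrefixRepeated_alt s
  exact pvFinal s
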